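-- pv_equiv track=rewrite | github.com/iaraski/mas-wrestling-backend | app/routers/live.py | _round_robin_rounds_with_bye_priority
-- ===== SOURCE A (Python) =====
-- def _round_robin_rounds_with_bye_priority(athlete_ids: list[str]):
--     participants = list(athlete_ids)
--     n = len(participants)
--     if n < 2:
--         return []
--
--     bye_added = False
--     if n % 2 != 0:
--         participants.append(None)
--         n += 1
--         bye_added = True
--
--     rounds: list[list[tuple[str, str]]] = []
--     last_round_bye: str | None = None
--
--     for round_idx in range(n - 1):
--         pairs: list[tuple[str | None, str | None]] = []
--         bye_athlete: str | None = None
--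
--         for j in range(n // 2):
--             a = participants[j]
--             b = participants[n - 1 - j]
--             if a is None and b is None:
--                 continue
--             if a is None or b is None:
--                 bye_athlete = a if a is not None else b
--                 continue
--             pairs.append((a, b))
--
--         if last_round_bye:
--             for i, (a, b) in enumerate(pairs):
--                 if a == last_round_bye or b == last_round_bye:
--                     if b == last_round_bye:
--                         pairs[i] = (b, a)
--                     pairs.insert(0, pairs.pop(i))
--                     break
--
--         rounds.append([(a, b) for a, b in pairs])
--         last_round_bye = bye_athlete if bye_added else None
--
--         participants = [participants[0]] + [participants[-1]] + participants[1:-1]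
--
--     return rounds
-- ===== SOURCE B (Python) =====
-- def _round_robin_rounds_with_bye_priority(athlete_ids: list[str]):
--     ids = list(athlete_ids)
--     if len(ids) < 2:
--         return []
--
--     bye_added = len(ids) % 2 != 0
--     n = len(ids) + 1 if bye_added else len(ids)
--     m = n - 1
--     first, rest = ids[0], ids[1:]
--
--     # Occupant of circle slot `slot` (0..n-1) in round r: slot 0 is pinned to
--     # the first athlete; the remaining m slots rotate over `rest` (with the
--     # conceptual bye occupying the last original position when bye_added).
--     def occ(slot, r):
--         if slot == 0:
--             return first
--         i = (slot - 1 - r) % m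
--         if bye_added and i == m - 1:
--             return None
--         return rest[i]
--
--     rounds = []
--     last_round_bye = None
--     for r in range(m):
--         pairs = []
--         bye_athlete = None
--         for j in range(n // 2):
--             a = occ(j, r)
--             b = occ(n - 1 - j, r)
--             if a is None or b is None:
--                 bye_athlete = b if a is None else a
--             else:
--                 pairs.append((a, b))
--
--         if last_round_bye:
--             for i, (a, b) in enumerate(pairs):
--                 if a == last_round_bye or b == last_round_bye:
--                     if b == last_round_bye:
--                         pairs[i] = (b, a)
--                     pairs.insert(0, pairs.pop(i))
--                     break
--
--         rounds.append(pairs)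
--         last_round_bye = bye_athlete
--     return rounds
-- ===== Notes on version B (the rewrite author's own statement) =====
-- stated objective: alternative
-- what changed: B never mutates or rebuilds the participants list: it fixes athlete 0 and computes the occupant of every circle slot in every round by a closed-form modular-index formula over the unchanged input (with the bye as a fixed rotating index), keeping the same pairing, bye tracking and last-round-bye reordering.
import Mathlib
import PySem

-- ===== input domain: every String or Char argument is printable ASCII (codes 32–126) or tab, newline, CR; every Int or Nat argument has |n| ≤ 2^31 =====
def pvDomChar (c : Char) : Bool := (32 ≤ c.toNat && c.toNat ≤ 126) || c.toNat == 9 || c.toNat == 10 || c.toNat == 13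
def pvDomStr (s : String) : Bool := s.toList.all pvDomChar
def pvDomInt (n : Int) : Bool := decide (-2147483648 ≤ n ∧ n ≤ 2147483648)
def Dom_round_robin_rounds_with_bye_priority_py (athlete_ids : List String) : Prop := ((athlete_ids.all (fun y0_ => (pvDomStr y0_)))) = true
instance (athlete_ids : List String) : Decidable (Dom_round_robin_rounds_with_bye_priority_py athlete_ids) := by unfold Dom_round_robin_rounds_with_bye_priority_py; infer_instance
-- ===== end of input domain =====

-- B replaces A's per-round physical rotation of the participants list by a closed-form
-- modular occupant formula over the fixed input (objective: alternative decomposition, same cost).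

-- shared helper: Python truthiness of the `str | None` value `last_round_bye`
def pvTruthy (o : Option String) : Bool :=
  match o with
  | none => false
  | some s => !(s == "")

-- shared helper: the bye-priority reordering loop (enumerate / pop(i) / insert(0) / break);
-- these lines are identical in A and in Source B
def pvReorderGo (lb : Option String) (acc : List (String × String)) :
    List (String × String) → List (String × String)
  | [] => acc.reverse
  | (a, b) :: t =>
    if some a = lb ∨ some b = lb then
      (if some b = lb then (b, a) else (a, b)) :: (acc.reverse ++ t)
    else pvReorderGo lb ((a, b) :: acc) t

def pvReorder (lb : Option String) (pairs : List (String × String)) : List (String × String) :=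
  pvReorderGo lb [] pairs

-- ===== PORT A =====
-- inner pairing loop of A: reads slots j and n-1-j of the current participants list
-- (all indices are in range, so pyGetD with a default is exact here)
def pvInnerA (n : Int) (parts : List (Option String)) :
    List (String × String) × Option String :=
  (PySem.List.pyRange 0 (PySem.Int.floordiv n 2)).foldl (fun pb j =>
    let a := PySem.List.pyGetD parts j none
    let b := PySem.List.pyGetD parts (n - 1 - j) none
    if a.isNone && b.isNone then pb
    else if a.isNone || b.isNone then (pb.1, if a.isSome then a else b)
    else (pb.1 ++ [(a.getD "", b.getD "")], pb.2)) ([], none)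

-- one round of A: pair, reorder by last round's bye, record the round, rotate the list
def pvStepA (n : Int) (bye_added : Bool)
    (st : List (List (String × String)) × Option String × List (Option String)) (_ri : Int) :
    List (List (String × String)) × Option String × List (Option String) :=
  let inner := pvInnerA n st.2.2
  let pairs := if pvTruthy st.2.1 then pvReorder st.2.1 inner.1 else inner.1
  (st.1 ++ [pairs],
   (if bye_added then inner.2 else none),
   [PySem.List.pyGetD st.2.2 0 none] ++ [PySem.List.pyGetD st.2.2 (-1) none]
     ++ PySem.List.slice st.2.2 (some 1) (some (-1)))

def round_robin_rounds_with_bye_priority_py (athlete_ids : List String) :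
    List (List (String × String)) :=
  let participants : List (Option String) := athlete_ids.map some
  let n : Int := (participants.length : Int)
  if n < 2 then []
  else
    let bye_added : Bool := PySem.Int.mod n 2 != 0
    let participants := if bye_added then participants ++ [none] else participants
    let n := if bye_added then n + 1 else n
    ((PySem.List.pyRange 0 (n - 1)).foldl (pvStepA n bye_added) ([], none, participants)).1

-- ===== PORT B =====
-- occupant of circle slot `slot` in round r (Source B's `occ`): slot 0 is pinned, the other
-- m slots rotate over `rest`; the conceptual bye sits at rotating index m-1
def pvOcc (byeAdded : Bool) (first : String) (rest : List String) (m : Int)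
    (slot r : Int) : Option String :=
  if slot = 0 then some first
  else
    let i := PySem.Int.mod (slot - 1 - r) m
    if byeAdded && (i == m - 1) then none
    else some (PySem.List.pyGetD rest i "")

-- inner pairing loop of B: occupants come from the formula, no list is maintained
def pvInnerB (byeAdded : Bool) (first : String) (rest : List String) (n m r : Int) :
    List (String × String) × Option String :=
  (PySem.List.pyRange 0 (PySem.Int.floordiv n 2)).foldl (fun pb j =>
    let a := pvOcc byeAdded first rest m j r
    let b := pvOcc byeAdded first rest m (n - 1 - j) r
    if a.isNone || b.isNone then (pb.1, if a.isNone then b else a)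
    else (pb.1 ++ [(a.getD "", b.getD "")], pb.2)) ([], none)

def pvStepB (byeAdded : Bool) (first : String) (rest : List String) (n m : Int)
    (st : List (List (String × String)) × Option String) (r : Int) :
    List (List (String × String)) × Option String :=
  let inner := pvInnerB byeAdded first rest n m r
  let pairs := if pvTruthy st.2 then pvReorder st.2 inner.1 else inner.1
  (st.1 ++ [pairs], inner.2)

def round_robin_rounds_with_bye_priority_py_alt (athlete_ids : List String) :
    List (List (String × String)) :=
  if athlete_ids.length < 2 then []
  else
    let byeAdded : Bool := PySem.Int.mod (athlete_ids.length : Int) 2 != 0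
    let n : Int := if byeAdded then (athlete_ids.length : Int) + 1 else (athlete_ids.length : Int)
    let m : Int := n - 1
    let first : String := PySem.List.pyGetD athlete_ids 0 ""
    let rest : List String := PySem.List.slice athlete_ids (some 1) none
    ((PySem.List.pyRange 0 m).foldl (pvStepB byeAdded first rest n m) ([], none)).1

-- ===== PRECONDITION & SPEC =====
def Spec_round_robin_rounds_with_bye_priority_py (athlete_ids : List String) (out : List (List (String × String))) : Prop := out = round_robin_rounds_with_bye_priority_py_alt athlete_ids
instance (athlete_ids : List String) (out : List (List (String × String))) : Decidable (Spec_round_robin_rounds_with_bye_priority_py athlete_ids out) := by unfold Spec_round_robin_rounds_with_bye_priority_py; infer_instance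

-- ===== CLAIM (what is proved, stated in full; the proofs are below) =====
def Claim_equal_round_robin_rounds_with_bye_priority_py : Prop := ∀ (athlete_ids : List String), Dom_round_robin_rounds_with_bye_priority_py athlete_ids → Spec_round_robin_rounds_with_bye_priority_py athlete_ids (round_robin_rounds_with_bye_priority_py athlete_ids)

-- ===== LEMMAS AND PROOFS =====

-- the rotating part of the circle as a fixed list: the rest athletes, then the bye if added
def pvRf (bye : Bool) (t : List String) : List (Option String) :=
  if bye then t.map some ++ [none] else t.map some

-- model of A's participants list after r rotations
def pvP (bye : Bool) (x : String) (t : List String) (m r : Int) : List (Option String) :=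
  some x ::
    (List.range m.toNat).map
      (fun (i : Nat) => (pvRf bye t).getD (PySem.Int.mod ((i : Int) - r) m).toNat none)

lemma pvP_zero (bye : Bool) (x : String) (t : List String) (m : Int)
    (hM : (pvRf bye t).length = m.toNat) (hm : 0 < m) :
    pvP bye x t m 0 = some x :: pvRf bye t := by
  unfold pvP
  congr 1
  apply List.ext_getElem
  · simp [hM]
  · intro i h1 h2
    simp only [List.getElem_map, List.getElem_range]
    have hi : (i : Int) < m := by
      have : i < m.toNat := by simpa using h1
      omega
    rw [PySem.Int.mod_eq_emod_of_pos hm, sub_zero, Int.emod_eq_of_lt (by positivity) hi]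
    simp [List.getD_eq_getElem?_getD, List.getElem?_eq_getElem h2]

lemma pvP_get (bye : Bool) (x : String) (t : List String) (m r j : Int)
    (hM : (pvRf bye t).length = m.toNat) (hm : 0 < m)
    (hj0 : 0 ≤ j) (hj1 : j < m + 1) :
    PySem.List.pyGetD (pvP bye x t m r) j none = pvOcc bye x t m j r := by
  have hmod0 := PySem.Int.mod_nonneg (j - 1 - r) hm
  have hmod1 := PySem.Int.mod_lt (j - 1 - r) hm
  unfold pvP pvOcc
  rw [PySem.List.pyGetD_of_nonneg _ _ hj0]
  by_cases hj : j = 0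
  · subst hj; simp
  · have hjt : j.toNat = (j - 1).toNat + 1 := by omega
    rw [hjt]
    simp only [List.getD_cons_succ]
    rw [PySem.List.getD_map_range _ _ _ _ (by omega)]
    have hcast : (((j - 1).toNat : Int)) = j - 1 := by omega
    rw [hcast, if_neg hj]
    set i := PySem.Int.mod (j - 1 - r) m with hidef
    unfold pvRf at hM ⊢
    cases bye
    · have ht : t.length = m.toNat := by simpa using hM
      simp only [Bool.false_and, if_neg Bool.false_ne_true]
      rw [PySem.List.pyGetD_of_nonneg _ _ hmod0]
      rw [List.getD_eq_getElem?_getD, List.getD_eq_getElem?_getD, List.getElem?_map]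
      have hlt : i.toNat < t.length := by omega
      simp [List.getElem?_eq_getElem hlt]
    · have ht : t.length + 1 = m.toNat := by simpa using hM
      simp only [if_true, Bool.true_and]
      by_cases hlast : i = m - 1
      · have hit : i.toNat = t.length := by omega
        have hbeq : (i == m - 1) = true := by simpa using hlast
        rw [hbeq, if_pos rfl]
        rw [List.getD_eq_getElem?_getD, List.getElem?_append_right (by simp; omega)]
        simp [hit]
      · have hbeq : (i == m - 1) = false := by simpa using hlast
        rw [hbeq]
        simp only [Bool.false_eq_true, if_false]
        have hlt : i.toNat < t.length := by omega
        rw [PySem.List.pyGetD_of_nonneg _ _ hmod0]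
        rw [List.getD_eq_getElem?_getD, List.getD_eq_getElem?_getD,
            List.getElem?_append_left (by simpa using hlt), List.getElem?_map]
        simp [List.getElem?_eq_getElem hlt]

lemma pvOcc_not_both_none (bye : Bool) (x : String) (t : List String) (n m r j : Int)
    (hn : n = m + 1) (hm : 0 < m) (hj0 : 0 ≤ j) (hj2 : 2 * j + 2 ≤ n) :
    ¬(pvOcc bye x t m j r = none ∧ pvOcc bye x t m (n - 1 - j) r = none) := by
  rintro ⟨ha, hb⟩
  unfold pvOcc at ha hb
  by_cases hj : j = 0
  · subst hj; simp at ha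
  · rw [if_neg hj] at ha
    have hslot : ¬(n - 1 - j = 0) := by omega
    rw [if_neg hslot] at hb
    -- both branches must have taken the `none` arm
    have h1 : PySem.Int.mod (j - 1 - r) m = m - 1 := by
      by_contra h
      simp [h] at ha
    have h2 : PySem.Int.mod (n - 1 - j - 1 - r) m = m - 1 := by
      by_contra h
      simp [h] at hb
    rw [PySem.Int.mod_eq_emod_of_pos hm] at h1 h2
    -- subtracting: m divides (m - 2*j), hence m ∣ 2*j, impossible for 1 ≤ j, 2*j < m
    have hd : m ∣ ((n - 1 - j - 1 - r) - (j - 1 - r)) := by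
      have hsub : ((n - 1 - j - 1 - r) - (j - 1 - r)) % m = 0 := by
        rw [Int.sub_emod, h1, h2, sub_self, Int.zero_emod]
      exact (PySem.Int.emod_eq_zero_iff_dvd _ _).mp hsub
    have hd2 : m ∣ 2 * j := by
      have : (n - 1 - j - 1 - r) - (j - 1 - r) = m - 2 * j := by omega
      rw [this] at hd
      have := dvd_sub (dvd_refl m) hd
      simpa using this
    have := Int.le_of_dvd (by omega) hd2
    omega

lemma pvInner_eq (bye : Bool) (x : String) (t : List String) (n m r : Int)
    (hn : n = m + 1) (hm : 0 < m)
    (hM : (pvRf bye t).length = m.toNat) :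
    pvInnerA n (pvP bye x t m r) = pvInnerB bye x t n m r := by
  unfold pvInnerA pvInnerB
  apply PySem.List.foldl_congr_mem
  intro pb j hj
  rw [PySem.List.mem_pyRange_one] at hj
  have hhalf : 2 * PySem.Int.floordiv n 2 ≤ n := by
    have := PySem.Int.floordiv_mul_add_mod n 2
    have := PySem.Int.mod_nonneg n (by norm_num : (0:Int) < 2)
    omega
  have hj2 : 2 * j + 2 ≤ n := by omega
  have hjn : j < m + 1 := by omega
  have hbn0 : 0 ≤ n - 1 - j := by omega
  have hbn1 : n - 1 - j < m + 1 := by omega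
  rw [pvP_get bye x t m r j hM hm hj.1 hjn,
      pvP_get bye x t m r (n - 1 - j) hM hm hbn0 hbn1]
  have hnb := pvOcc_not_both_none bye x t n m r j hn hm hj.1 hj2
  set a := pvOcc bye x t m j r with hadef
  set b := pvOcc bye x t m (n - 1 - j) r with hbdef
  match a, b with
  | none, none => exact absurd ⟨rfl, rfl⟩ hnb
  | none, some v => simp
  | some u, none => simp
  | some u, some v => simp

lemma pvInnerB_snd_go (x : String) (t : List String) (n m r : Int) :
    ∀ (l : List Int) (pb : List (String × String) × Option String),
      (l.foldl (fun pb j =>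
        let a := pvOcc false x t m j r
        let b := pvOcc false x t m (n - 1 - j) r
        if a.isNone || b.isNone then (pb.1, if a.isNone then b else a)
        else (pb.1 ++ [(a.getD "", b.getD "")], pb.2)) pb).2 = pb.2 := by
  intro l
  induction l with
  | nil => intro pb; rfl
  | cons h l ih =>
    intro pb
    rw [List.foldl_cons, ih]
    have ha : (pvOcc false x t m h r).isNone = false := by
      unfold pvOcc; split <;> simp
    have hb : (pvOcc false x t m (n - 1 - h) r).isNone = false := by
      unfold pvOcc; split <;> simp
    simp [ha, hb]

lemma pvInnerB_snd_of_not_bye (x : String) (t : List String) (n m r : Int) :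
    (pvInnerB false x t n m r).2 = none := by
  unfold pvInnerB
  exact pvInnerB_snd_go x t n m r _ _

lemma pvGetD_neg_one_cons (L : List (Option String)) (x : Option String) (hL : L ≠ []) :
    PySem.List.pyGetD (x :: L) (-1) none = L.getD (L.length - 1) none := by
  simp only [PySem.List.pyGetD, PySem.List.pyGet?, PySem.List.pyIdx?, Int.reduceNeg, Int.neg_nonneg,
    Int.reduceLE, reduceIte, List.length_cons, Nat.cast_add, Nat.cast_one, neg_add_rev, add_le_iff_nonpos_right,
    Left.neg_nonpos_iff, Nat.cast_nonneg, neg_neg, Int.toNat_one, add_tsub_cancel_right, Option.bind_some,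
    lt_add_iff_pos_right, Order.lt_one_iff, getElem?_pos, Option.getD_some, List.getD_eq_getElem?_getD]
  rcases L with _ | ⟨y, L'⟩
  · exact absurd rfl hL
  · simp
    rfl

lemma pvP_rotate (bye : Bool) (x : String) (t : List String) (m r : Int)
    (hM : (pvRf bye t).length = m.toNat) (hm : 0 < m) :
    [PySem.List.pyGetD (pvP bye x t m r) 0 none]
      ++ [PySem.List.pyGetD (pvP bye x t m r) (-1) none]
      ++ PySem.List.slice (pvP bye x t m r) (some 1) (some (-1))
      = pvP bye x t m (r + 1) := by
  have hM1 : 1 ≤ m.toNat := by omega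
  unfold pvP
  have h0 : PySem.List.pyGetD
      (some x :: (List.range m.toNat).map
        (fun (i : Nat) => (pvRf bye t).getD (PySem.Int.mod ((i : Int) - r) m).toNat none)) 0 none
      = some x := by
    rw [PySem.List.pyGetD_of_nonneg _ _ le_rfl]; rfl
  rw [h0]
  have hslice : PySem.List.slice
      (some x :: (List.range m.toNat).map
        (fun (i : Nat) => (pvRf bye t).getD (PySem.Int.mod ((i : Int) - r) m).toNat none))
      (some 1) (some (-1))
      = ((List.range m.toNat).map
        (fun (i : Nat) => (pvRf bye t).getD (PySem.Int.mod ((i : Int) - r) m).toNat none)).take (m.toNat - 1) := by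
    simp [PySem.List.slice, PySem.List.clampIdx]
    omega
  rw [hslice]
  have hneg : PySem.List.pyGetD
      (some x :: (List.range m.toNat).map
        (fun (i : Nat) => (pvRf bye t).getD (PySem.Int.mod ((i : Int) - r) m).toNat none))
      (-1) none
      = (pvRf bye t).getD (PySem.Int.mod (((m.toNat - 1 : Nat) : Int) - r) m).toNat none := by
    rw [pvGetD_neg_one_cons _ _ (by simp; omega)]
    simp only [List.length_map, List.length_range]
    rw [List.getD_eq_getElem?_getD, List.getElem?_map,
        List.getElem?_range (by omega : m.toNat - 1 < m.toNat)]
    rfl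
  rw [hneg]
  simp only [List.singleton_append]
  apply List.ext_getElem
  · simp; omega
  · intro i h1 h2
    match i with
    | 0 => simp
    | 1 =>
      simp only [List.cons_append, List.nil_append, List.getElem_cons_succ,
                 List.getElem_cons_zero, List.getElem_map, List.getElem_range]
      have hc : (((m.toNat - 1 : Nat) : Int)) - r = (((0:Nat) : Int) - (r + 1)) + m := by
        push_cast [hM1]; omega
      rw [hc, PySem.Int.mod_eq_emod_of_pos hm, PySem.Int.mod_eq_emod_of_pos hm,
          Int.add_emod_right]
    | (i + 2) =>
      simp only [List.cons_append, List.nil_append, List.getElem_cons_succ,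
                 List.getElem_map, List.getElem_range, List.getElem_take]
      have hc : ((i + 1 : Nat) : Int) - (r + 1) = (i : Int) - r := by push_cast; ring
      rw [hc]

lemma pvStep_eq (bye : Bool) (x : String) (t : List String) (n m r : Int) (ri : Int)
    (hn : n = m + 1) (hm : 0 < m)
    (hM : (pvRf bye t).length = m.toNat)
    (rounds : List (List (String × String))) (lrb : Option String) :
    pvStepA n bye (rounds, lrb, pvP bye x t m r) ri
      = ((pvStepB bye x t n m (rounds, lrb) r).1,
         (pvStepB bye x t n m (rounds, lrb) r).2,
         pvP bye x t m (r + 1)) := by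
  unfold pvStepA pvStepB
  simp only
  rw [pvInner_eq bye x t n m r hn hm hM, pvP_rotate bye x t m r hM hm]
  cases bye
  · rw [pvInnerB_snd_of_not_bye]; simp
  · rfl

lemma pvOuter_eq (bye : Bool) (x : String) (t : List String) (n m : Int)
    (hn : n = m + 1) (hm : 0 < m) (hM : (pvRf bye t).length = m.toNat) :
    ∀ (fuel : Nat) (r : Int), 0 ≤ r → r + (fuel : Int) = m →
    ∀ (rounds : List (List (String × String))) (lrb : Option String),
      (PySem.List.pyRange r m).foldl (pvStepA n bye) (rounds, lrb, pvP bye x t m r)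
        = (((PySem.List.pyRange r m).foldl (pvStepB bye x t n m) (rounds, lrb)).1,
           ((PySem.List.pyRange r m).foldl (pvStepB bye x t n m) (rounds, lrb)).2,
           pvP bye x t m m) := by
  intro fuel
  induction fuel with
  | zero =>
    intro r hr0 hrm rounds lrb
    have hrm' : r = m := by omega
    have hempty : PySem.List.pyRange r m = [] := by
      simp [PySem.List.pyRange]
      omega
    rw [hempty, hrm']
    rfl
  | succ fuel ih =>
    intro r hr0 hrm rounds lrb
    have hlt : r < m := by omega
    rw [PySem.List.pyRange_one_cons hlt]
    rw [List.foldl_cons, List.foldl_cons]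
    rw [pvStep_eq bye x t n m r r hn hm hM rounds lrb]
    exact ih (r + 1) (by omega) (by omega) _ _

lemma pvAssemble (bye : Bool) (x : String) (t : List String) (n : Int)
    (hm : 0 < n - 1) (hM : (pvRf bye t).length = (n - 1).toNat) :
    ((PySem.List.pyRange 0 (n - 1)).foldl (pvStepA n bye)
        ([], none, if bye = true then (x :: t).map some ++ [none] else (x :: t).map some)).1
      = ((PySem.List.pyRange 0 (n - 1)).foldl (pvStepB bye x t n (n - 1)) ([], none)).1 := by
  have hparts : (if bye = true then (x :: t).map some ++ [none] else (x :: t).map some)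
      = pvP bye x t (n - 1) 0 := by
    rw [pvP_zero bye x t (n - 1) hM hm]
    cases bye <;> simp [pvRf]
  rw [hparts,
      pvOuter_eq bye x t n (n - 1) (by ring) hm hM (n - 1).toNat 0 le_rfl (by omega) [] none]

lemma pvMain (ids : List String) :
    round_robin_rounds_with_bye_priority_py ids
      = round_robin_rounds_with_bye_priority_py_alt ids := by
  unfold round_robin_rounds_with_bye_priority_py round_robin_rounds_with_bye_priority_py_alt
  by_cases h2 : ids.length < 2
  · rw [if_pos (by simp; omega : ((ids.map some).length : Int) < 2), if_pos h2]
  · rw [if_neg (by simp; omega : ¬ ((ids.map some).length : Int) < 2), if_neg h2]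
    obtain ⟨x, t, rfl⟩ : ∃ x t, ids = x :: t := by
      cases ids with
      | nil => simp at h2
      | cons a b => exact ⟨a, b, rfl⟩
    simp only [List.length_map]
    have hfirst : PySem.List.pyGetD (x :: t) 0 "" = x := by
      rw [PySem.List.pyGetD_of_nonneg _ _ le_rfl]; rfl
    have hrest : PySem.List.slice (x :: t) (some 1) none = t := by
      rw [PySem.List.slice_from _ (by norm_num)]; rfl
    rw [hfirst, hrest]
    have hm : 0 < (if (PySem.Int.mod (((x :: t).length : Int)) 2 != 0) = true
        then ((x :: t).length : Int) + 1 else ((x :: t).length : Int)) - 1 := by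
      split <;> (simp only [List.length_cons] at h2 ⊢; push_cast; omega)
    have hM : (pvRf (PySem.Int.mod (((x :: t).length : Int)) 2 != 0) t).length
        = ((if (PySem.Int.mod (((x :: t).length : Int)) 2 != 0) = true
            then ((x :: t).length : Int) + 1 else ((x :: t).length : Int)) - 1).toNat := by
      cases hcc : (PySem.Int.mod (((x :: t).length : Int)) 2 != 0) with
      | false => simp [pvRf]
      | true => simp [pvRf]
    exact pvAssemble _ x t _ hm hM
-- ===== VERDICT (by name: the statement is the Claim_ definition above) =====
theorem round_robin_rounds_with_bye_priority_py_spec : Claim_equal_round_robin_rounds_with_bye_priority_py := by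
  intro athlete_ids _
  unfold Spec_round_robin_rounds_with_bye_priority_py
  exact pvMain athlete_ids
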